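-- pv_equiv track=rewrite | github.com/pypi-data/pypi-mirror-401 | packages/iamt/iamt-1.1.19-py3-none-any.whl/iamt/client_config/client_config.py | _parse_os_release
-- ===== SOURCE A (Python) =====
-- def _parse_os_release(content: str) -> dict:
--     """解析 /etc/os-release 内容"""
--     info = {"name": "", "version": "", "version_id": "", "codename": "", "id": "", "id_like": ""}
--     for line in content.splitlines():
--         if "=" in line:
--             key, _, value = line.partition("=")
--             value = value.strip('"\'')
--             key_lower = key.lower()
--             if key_lower == "name":
--                 info["name"] = value
--             elif key_lower == "version":
--                 info["version"] = value
--             elif key_lower == "version_id":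
--                 info["version_id"] = value
--             elif key_lower == "version_codename":
--                 info["codename"] = value
--             elif key_lower == "id":
--                 info["id"] = value
--             elif key_lower == "id_like":
--                 info["id_like"] = value
--     # 如果 id_like 为空，使用 id 作为回退
--     if not info["id_like"]:
--         info["id_like"] = info["id"]
--     return info
-- ===== SOURCE B (Python) =====
-- def _parse_os_release(content: str) -> dict:
--     # Per-field search: scan the lines in reverse and take the FIRST match,
--     # which equals the last-occurrence-wins of a forward pass.
--     lines = content.splitlines()[::-1]
--
--     def lookup(src):
--         for line in lines:
--             key, sep, value = line.partition("=")
--             if sep and key.lower() == src: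
--                 return value.strip('"\'')
--         return ""
--
--     info = {"name": lookup("name"), "version": lookup("version"),
--             "version_id": lookup("version_id"), "codename": lookup("version_codename"),
--             "id": lookup("id"), "id_like": lookup("id_like")}
--     if not info["id_like"]:
--         info["id_like"] = info["id"]
--     return info
-- ===== Notes on version B (the rewrite author's own statement) =====
-- stated objective: alternative
-- what changed: Replaces A's single forward pass with an inline six-way if/elif dispatch by six independent per-field searches over the reversed line list (first match in reverse = last-occurrence-wins), so no mutable info dict is threaded through a loop.
import Mathlib
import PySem

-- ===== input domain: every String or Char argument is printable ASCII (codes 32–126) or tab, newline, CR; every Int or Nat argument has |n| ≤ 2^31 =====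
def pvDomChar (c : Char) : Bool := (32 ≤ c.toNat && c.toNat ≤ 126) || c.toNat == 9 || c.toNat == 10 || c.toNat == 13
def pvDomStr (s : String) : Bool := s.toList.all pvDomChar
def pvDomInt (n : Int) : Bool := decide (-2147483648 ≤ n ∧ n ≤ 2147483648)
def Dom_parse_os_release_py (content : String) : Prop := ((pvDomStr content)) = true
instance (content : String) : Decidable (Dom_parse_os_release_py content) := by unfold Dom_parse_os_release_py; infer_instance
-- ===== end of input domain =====

-- B replaces A's single forward pass with an if/elif dispatch by six per-field first-match searches over the reversed lines; same cost, different algorithmic decomposition.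

-- shared helper: line.partition("=") without the middle component — exact:
-- Python returns (before-first-'=', '=', after) when '=' occurs and (line, '', '') otherwise;
-- both ports use it only under a guard equivalent to '"=" in line'.
def partitionEq : List Char → List Char × List Char
  | [] => ([], [])
  | c :: rest =>
    if c = '=' then ([], rest)
    else
      let kv := partitionEq rest
      (c :: kv.1, kv.2)

-- ===== PORT A =====
-- one loop iteration of A: the '=' guard, partition, strip, lower, then the if/elif chain
def pvStepA (info : PySem.Dict String String) (line : String) : PySem.Dict String String :=
  if PySem.Str.isIn "=" line then
    let kv := partitionEq line.toList
    let value := String.ofList (PySem.Chars.stripChars kv.2 "\"'".toList)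
    let key_lower := PySem.Str.lower (String.ofList kv.1)
    if key_lower == "name" then info.insert "name" value
    else if key_lower == "version" then info.insert "version" value
    else if key_lower == "version_id" then info.insert "version_id" value
    else if key_lower == "version_codename" then info.insert "codename" value
    else if key_lower == "id" then info.insert "id" value
    else if key_lower == "id_like" then info.insert "id_like" value
    else info
  else info

def parse_os_release_py (content : String) : List (String × String) :=
  let info0 : PySem.Dict String String :=
    PySem.Dict.ofList [("name", ""), ("version", ""), ("version_id", ""), ("codename", ""), ("id", ""), ("id_like", "")]
  let info := (PySem.Str.splitlines content).foldl pvStepA info0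
  let info := if info.getD "id_like" "" == "" then info.insert "id_like" (info.getD "id" "") else info
  info.items

-- ===== PORT B =====
-- B's inner 'lookup': first line (of the already-reversed list) whose '=' exists and lowered key equals src
def pvLookup (src : String) : List String → String
  | [] => ""
  | line :: rest =>
    let kv := partitionEq line.toList
    -- 'if sep and key.lower() == src': sep nonempty iff '=' in line
    if PySem.Str.isIn "=" line && (PySem.Str.lower (String.ofList kv.1) == src) then
      String.ofList (PySem.Chars.stripChars kv.2 "\"'".toList)
    else pvLookup src rest

def parse_os_release_py_alt (content : String) : List (String × String) :=
  let lines := (PySem.Str.splitlines content).reverse   -- content.splitlines()[::-1]: exact, [::-1] is reversal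
  let info : PySem.Dict String String := PySem.Dict.ofList
    [("name", pvLookup "name" lines), ("version", pvLookup "version" lines),
     ("version_id", pvLookup "version_id" lines), ("codename", pvLookup "version_codename" lines),
     ("id", pvLookup "id" lines), ("id_like", pvLookup "id_like" lines)]
  let info := if info.getD "id_like" "" == "" then info.insert "id_like" (info.getD "id" "") else info
  info.items

-- ===== PRECONDITION & SPEC =====
def Spec_parse_os_release_py (content : String) (out : List (String × String)) : Prop := out = parse_os_release_py_alt content
instance (content : String) (out : List (String × String)) : Decidable (Spec_parse_os_release_py content out) := by unfold Spec_parse_os_release_py; infer_instance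

-- ===== CLAIM (what is proved, stated in full; the proofs are below) =====
def Claim_equal_parse_os_release_py : Prop := ∀ (content : String), Dom_parse_os_release_py content → Spec_parse_os_release_py content (parse_os_release_py content)

-- ===== LEMMAS AND PROOFS =====

-- proof-side: a generic "parse every key=value line" step; A's fold is its select view
def pvStepP (parsed : PySem.Dict String String) (line : String) : PySem.Dict String String :=
  if PySem.Str.isIn "=" line then
    let kv := partitionEq line.toList
    parsed.insert (PySem.Str.lower (String.ofList kv.1)) (String.ofList (PySem.Chars.stripChars kv.2 "\"'".toList))
  else parsed

def pvFields : List (String × String) :=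
  [("name", "name"), ("version", "version"), ("version_id", "version_id"),
   ("codename", "version_codename"), ("id", "id"), ("id_like", "id_like")]

def pvSelect (parsed : PySem.Dict String String) : PySem.Dict String String :=
  PySem.Dict.ofList (pvFields.map (fun ts => (ts.1, parsed.getD ts.2 "")))

-- A's if/elif dispatch on an arbitrary lowered key, applied to the selected view, is select after a generic insert
theorem select_insert (p : PySem.Dict String String) (kl v : String) :
    (if kl == "name" then (pvSelect p).insert "name" v
    else if kl == "version" then (pvSelect p).insert "version" v
    else if kl == "version_id" then (pvSelect p).insert "version_id" v
    else if kl == "version_codename" then (pvSelect p).insert "codename" v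
    else if kl == "id" then (pvSelect p).insert "id" v
    else if kl == "id_like" then (pvSelect p).insert "id_like" v
    else pvSelect p) = pvSelect (p.insert kl v) := by
  by_cases h1 : kl = "name"
  · subst h1
    simp only [pvSelect, pvFields, List.map, PySem.Dict.getD_insert, beq_self_eq_true, if_true]
    simp
    simp [PySem.Dict.ofList, PySem.Dict.update, PySem.Dict.insert,
      PySem.Dict.empty, PySem.Dict.contains]
  by_cases h2 : kl = "version"
  · subst h2
    simp only [pvSelect, pvFields, List.map, PySem.Dict.getD_insert, beq_self_eq_true, if_true]
    simp
    simp [PySem.Dict.ofList, PySem.Dict.update, PySem.Dict.insert,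
      PySem.Dict.empty, PySem.Dict.contains]
  by_cases h3 : kl = "version_id"
  · subst h3
    simp only [pvSelect, pvFields, List.map, PySem.Dict.getD_insert, beq_self_eq_true, if_true]
    simp
    simp [PySem.Dict.ofList, PySem.Dict.update, PySem.Dict.insert,
      PySem.Dict.empty, PySem.Dict.contains]
  by_cases h4 : kl = "version_codename"
  · subst h4
    simp only [pvSelect, pvFields, List.map, PySem.Dict.getD_insert, beq_self_eq_true, if_true]
    simp
    simp [PySem.Dict.ofList, PySem.Dict.update, PySem.Dict.insert,
      PySem.Dict.empty, PySem.Dict.contains]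
  by_cases h5 : kl = "id"
  · subst h5
    simp only [pvSelect, pvFields, List.map, PySem.Dict.getD_insert, beq_self_eq_true, if_true]
    simp
    simp [PySem.Dict.ofList, PySem.Dict.update, PySem.Dict.insert,
      PySem.Dict.empty, PySem.Dict.contains]
  by_cases h6 : kl = "id_like"
  · subst h6
    simp only [pvSelect, pvFields, List.map, PySem.Dict.getD_insert, beq_self_eq_true, if_true]
    simp
    simp [PySem.Dict.ofList, PySem.Dict.update, PySem.Dict.insert,
      PySem.Dict.empty, PySem.Dict.contains]
  · simp only [pvSelect, pvFields, List.map, PySem.Dict.getD_insert]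
    simp [h1, h2, h3, h4, h5, h6, Ne.symm h1, Ne.symm h2, Ne.symm h3, Ne.symm h4, Ne.symm h5, Ne.symm h6]

-- one step of A on the selected view = select after one generic parse step
theorem stepA_select (p : PySem.Dict String String) (line : String) :
    pvStepA (pvSelect p) line = pvSelect (pvStepP p line) := by
  unfold pvStepA pvStepP
  by_cases h : PySem.Str.isIn "=" line = true
  · rw [if_pos h, if_pos h]
    exact select_insert p _ _
  · rw [if_neg h, if_neg h]

-- the whole loop: A folded from the selected empty view = select of the generic parse fold
theorem fold_select (lines : List String) (p : PySem.Dict String String) :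
    lines.foldl pvStepA (pvSelect p) = pvSelect (lines.foldl pvStepP p) := by
  induction lines generalizing p with
  | nil => rfl
  | cons l ls ih => simp only [List.foldl, stepA_select, ih]

-- first match in a list, Option-valued
def pvFind (src : String) : List String → Option String
  | [] => none
  | line :: rest =>
    let kv := partitionEq line.toList
    if PySem.Str.isIn "=" line && (PySem.Str.lower (String.ofList kv.1) == src) then
      some (String.ofList (PySem.Chars.stripChars kv.2 "\"'".toList))
    else pvFind src rest

theorem pvLookup_eq_find (src : String) (l : List String) :
    pvLookup src l = (pvFind src l).getD "" := by
  induction l with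
  | nil => rfl
  | cons x xs ih =>
    by_cases h : PySem.Chars.isIn ['='] x.toList = true ∧ PySem.Str.lower (String.ofList (partitionEq x.toList).1) = src
    · simp [pvLookup, pvFind, h]
    · simp [pvLookup, pvFind, h, ih]

theorem pvFind_append (src : String) (xs ys : List String) :
    pvFind src (xs ++ ys) = (pvFind src xs).or (pvFind src ys) := by
  induction xs with
  | nil => rfl
  | cons x rest ih =>
    by_cases h : PySem.Chars.isIn ['='] x.toList = true ∧ PySem.Str.lower (String.ofList (partitionEq x.toList).1) = src
    · simp [pvFind, h]
    · simp [pvFind, h, ih]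

-- one generic parse step, observed at key src, is a one-line first-match with the accumulator as fallback
theorem stepP_getD (p : PySem.Dict String String) (l src : String) :
    (pvStepP p l).getD src "" = (pvFind src [l]).getD (p.getD src "") := by
  by_cases h : PySem.Chars.isIn ['='] l.toList = true
  · by_cases hk : PySem.Str.lower (String.ofList (partitionEq l.toList).1) = src
    · simp [pvStepP, pvFind, h, hk]
    · simp [pvStepP, pvFind, h, hk]
      rw [PySem.Dict.getD_insert, if_neg (fun hh => hk hh.symm)]
  · simp [pvStepP, pvFind, h]

-- the fold's lookup of key src is the first match among the reversed lines, falling back to the accumulator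
theorem getD_fold_parse (src : String) (lines : List String) (p : PySem.Dict String String) :
    (lines.foldl pvStepP p).getD src "" =
      ((pvFind src lines.reverse).getD (p.getD src "")) := by
  induction lines generalizing p with
  | nil => rfl
  | cons l ls ih =>
    simp only [List.foldl, List.reverse_cons, pvFind_append, ih]
    cases hf : pvFind src ls.reverse with
    | some v => simp [Option.or]
    | none =>
      simpa [Option.or] using stepP_getD p l src

theorem getD_fold_empty (src : String) (lines : List String) :
    (lines.foldl pvStepP PySem.Dict.empty).getD src "" = pvLookup src lines.reverse := by
  rw [getD_fold_parse, pvLookup_eq_find, PySem.Dict.getD_empty]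

-- ===== VERDICT (by name: the statement is the Claim_ definition above) =====
theorem parse_os_release_py_spec : Claim_equal_parse_os_release_py := by
  intro content _
  unfold Spec_parse_os_release_py parse_os_release_py parse_os_release_py_alt
  dsimp only
  have h0 : (PySem.Dict.ofList [("name", ""), ("version", ""), ("version_id", ""), ("codename", ""), ("id", ""), ("id_like", "")] : PySem.Dict String String)
      = pvSelect PySem.Dict.empty := by decide
  rw [h0, fold_select]
  simp only [pvSelect, pvFields, List.map, getD_fold_empty]
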